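-- pv_equiv track=rewrite | github.com/klejvi-rekaj/DocuKit | backend/app/api/query.py | _build_readiness_message
-- ===== SOURCE A (Python) =====
-- from typing import Dict, List
--
-- def _build_readiness_message(documents: List[Dict[str, str]]) -> str:
--     if not documents:
--         return "This notebook does not have any uploaded documents yet. Upload a PDF first, then I can answer questions grounded in it."
--
--     indexed_docs = [doc for doc in documents if doc.get("processing_status") == "indexed"]
--     if indexed_docs:
--         return ""
--
--     pending_docs = [doc for doc in documents if doc.get("processing_status") in {"uploaded", "processing"}]
--     failed_docs = [doc for doc in documents if doc.get("processing_status") == "failed"]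
--
--     if pending_docs:
--         titles = ", ".join((doc.get("display_title") or doc.get("original_filename") or "document") for doc in pending_docs[:2])
--         suffix = " are" if len(pending_docs) > 1 else " is"
--         return f"{titles}{suffix} still being processed. I'll be able to answer once indexing finishes."
--
--     if failed_docs:
--         first_error = failed_docs[0].get("processing_error")
--         base = "I can't answer from this notebook yet because document indexing failed."
--         if first_error:
--             return f"{base} Latest error: {first_error}"
--         return base
--
--     return "This notebook is not ready for querying yet."
-- ===== SOURCE B (Python) =====
-- from typing import Dict, List
--
-- def _build_readiness_message(documents: List[Dict[str, str]]) -> str: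
--     if not documents:
--         return "This notebook does not have any uploaded documents yet. Upload a PDF first, then I can answer questions grounded in it."
--
--     # One short-circuiting pass keeping only scalars: pending count, at most two
--     # pending titles, and the first failed document's error. No document lists are built.
--     pending_count = 0
--     titles = []
--     failed_seen = False
--     failed_error = None
--     for doc in documents:
--         status = doc.get("processing_status")
--         if status == "indexed":
--             return ""
--         if status in ("uploaded", "processing"):
--             pending_count += 1
--             if pending_count <= 2:
--                 titles.append(doc.get("display_title") or doc.get("original_filename") or "document")
--         elif status == "failed" and not failed_seen:
--             failed_seen = True
--             failed_error = doc.get("processing_error")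
--
--     if pending_count:
--         suffix = " are" if pending_count > 1 else " is"
--         return f"{', '.join(titles)}{suffix} still being processed. I'll be able to answer once indexing finishes."
--
--     if failed_seen:
--         base = "I can't answer from this notebook yet because document indexing failed."
--         if failed_error:
--             return f"{base} Latest error: {failed_error}"
--         return base
--
--     return "This notebook is not ready for querying yet."
-- ===== Notes on version B (the rewrite author's own statement) =====
-- stated objective: alternative
-- what changed: Replaces A's three list comprehensions over the documents by a single short-circuiting pass that returns '' immediately on the first indexed document and otherwise maintains only scalars (pending count, at most two pending titles, first failed error) instead of building any filtered document lists.
import Mathlib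
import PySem

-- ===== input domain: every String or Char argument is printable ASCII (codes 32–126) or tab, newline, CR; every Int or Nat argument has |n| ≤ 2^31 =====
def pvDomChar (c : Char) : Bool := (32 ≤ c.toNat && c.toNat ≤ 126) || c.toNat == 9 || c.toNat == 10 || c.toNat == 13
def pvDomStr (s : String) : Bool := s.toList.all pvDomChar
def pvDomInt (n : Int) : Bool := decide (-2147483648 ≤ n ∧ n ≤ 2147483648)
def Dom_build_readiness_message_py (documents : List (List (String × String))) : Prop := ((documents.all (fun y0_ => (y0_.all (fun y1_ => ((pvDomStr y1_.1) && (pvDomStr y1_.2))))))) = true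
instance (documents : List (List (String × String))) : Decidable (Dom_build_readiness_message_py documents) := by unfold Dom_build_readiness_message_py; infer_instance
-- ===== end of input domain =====

-- B replaces A's three list-comprehension scans by one short-circuiting pass keeping
-- only scalars (pending count, at most two titles, first failed error); alternative
-- decomposition, same cost class.

-- ===== PORT A =====
-- doc.get(k) on the association-list dict
def pvGetA (doc : List (String × String)) (k : String) : Option String :=
  PySem.Dict.get? (PySem.Dict.mk doc) k

-- doc.get("display_title") or doc.get("original_filename") or "document"  (Python `or`: falsy = None or "")
def pvTitleA (doc : List (String × String)) : String :=
  match pvGetA doc "display_title" with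
  | some s => if s = "" then (match pvGetA doc "original_filename" with
                              | some t => if t = "" then "document" else t
                              | none => "document")
              else s
  | none => match pvGetA doc "original_filename" with
            | some t => if t = "" then "document" else t
            | none => "document"

def build_readiness_message_py (documents : List (List (String × String))) : String :=
  if documents = [] then
    "This notebook does not have any uploaded documents yet. Upload a PDF first, then I can answer questions grounded in it."
  else
    let indexed_docs := documents.filter (fun doc => pvGetA doc "processing_status" == some "indexed")
    if indexed_docs ≠ [] then ""
    else
      let pending_docs := documents.filter (fun doc =>
        pvGetA doc "processing_status" == some "uploaded" || pvGetA doc "processing_status" == some "processing")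
      let failed_docs := documents.filter (fun doc => pvGetA doc "processing_status" == some "failed")
      if pending_docs ≠ [] then
        let titles := PySem.Str.join ", " ((pending_docs.take 2).map pvTitleA)
        let suffix := if pending_docs.length > 1 then " are" else " is"
        titles ++ suffix ++ " still being processed. I'll be able to answer once indexing finishes."
      else
        match failed_docs with
        | f :: _ =>
          let base := "I can't answer from this notebook yet because document indexing failed."
          match pvGetA f "processing_error" with
          | some e => if e = "" then base else base ++ " Latest error: " ++ e
          | none => base
        | [] => "This notebook is not ready for querying yet."

-- ===== PORT B =====
def pvGetB (doc : List (String × String)) (k : String) : Option String :=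
  PySem.Dict.get? (PySem.Dict.mk doc) k

def pvTitleB (doc : List (String × String)) : String :=
  match pvGetB doc "display_title" with
  | some s => if s = "" then (match pvGetB doc "original_filename" with
                              | some t => if t = "" then "document" else t
                              | none => "document")
              else s
  | none => match pvGetB doc "original_filename" with
            | some t => if t = "" then "document" else t
            | none => "document"

-- the code after B's loop: decide from the maintained scalars
def pvFinalB (pc : Nat) (titles : List String) (fs : Bool) (fe : Option String) : String :=
  if pc ≠ 0 then
    let suffix := if pc > 1 then " are" else " is"
    PySem.Str.join ", " titles ++ suffix ++ " still being processed. I'll be able to answer once indexing finishes."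
  else if fs then
    let base := "I can't answer from this notebook yet because document indexing failed."
    match fe with
    | some e => if e = "" then base else base ++ " Latest error: " ++ e
    | none => base
  else "This notebook is not ready for querying yet."

-- B's loop: early return "" on an indexed document, otherwise update the scalars
def pvLoopB (docs : List (List (String × String))) (pc : Nat) (titles : List String)
    (fs : Bool) (fe : Option String) : String :=
  match docs with
  | [] => pvFinalB pc titles fs fe
  | d :: ds =>
    let s := pvGetB d "processing_status"
    if s == some "indexed" then ""
    else if s == some "uploaded" || s == some "processing" then
      pvLoopB ds (pc + 1) (if pc + 1 ≤ 2 then titles ++ [pvTitleB d] else titles) fs fe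
    else if s == some "failed" && !fs then
      pvLoopB ds pc titles true (pvGetB d "processing_error")
    else pvLoopB ds pc titles fs fe

def build_readiness_message_py_alt (documents : List (List (String × String))) : String :=
  if documents = [] then
    "This notebook does not have any uploaded documents yet. Upload a PDF first, then I can answer questions grounded in it."
  else pvLoopB documents 0 [] false none

-- ===== PRECONDITION & SPEC =====
def Spec_build_readiness_message_py (documents : List (List (String × String))) (out : String) : Prop := out = build_readiness_message_py_alt documents
instance (documents : List (List (String × String))) (out : String) : Decidable (Spec_build_readiness_message_py documents out) := by unfold Spec_build_readiness_message_py; infer_instance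

-- ===== CLAIM (what is proved, stated in full; the proofs are below) =====
def Claim_equal_build_readiness_message_py : Prop := ∀ (documents : List (List (String × String))), Dom_build_readiness_message_py documents → Spec_build_readiness_message_py documents (build_readiness_message_py documents)

-- ===== LEMMAS AND PROOFS =====

-- shorthand predicates for A's three filters (stated over pvGetB = pvGetA definitionally)
def pvIsIdx (d : List (String × String)) : Bool := pvGetB d "processing_status" == some "indexed"
def pvIsPend (d : List (String × String)) : Bool :=
  pvGetB d "processing_status" == some "uploaded" || pvGetB d "processing_status" == some "processing"
def pvIsFail (d : List (String × String)) : Bool := pvGetB d "processing_status" == some "failed"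

-- characterisation of B's loop in terms of A's filters of the remaining documents
theorem pvLoopB_char (docs : List (List (String × String))) (pc : Nat) (titles : List String)
    (fs : Bool) (fe : Option String) :
    pvLoopB docs pc titles fs fe =
      if docs.filter pvIsIdx ≠ [] then "" else
      pvFinalB (pc + (docs.filter pvIsPend).length)
        (titles ++ (((docs.filter pvIsPend).take (2 - pc)).map pvTitleB))
        (fs || docs.filter pvIsFail ≠ [])
        (if fs then fe else
          match docs.filter pvIsFail with
          | f :: _ => pvGetB f "processing_error"
          | [] => fe) := by
  induction docs generalizing pc titles fs fe with
  | nil => simp [pvLoopB]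
  | cons d ds ih =>
    rcases h : pvGetB d "processing_status" with _ | s
    · have hstep : pvLoopB (d :: ds) pc titles fs fe = pvLoopB ds pc titles fs fe := by
        simp [pvLoopB, h]
      rw [hstep, ih]
      simp [pvIsIdx, pvIsPend, pvIsFail, h]
    · by_cases h1 : s = "indexed"
      · have hstep : pvLoopB (d :: ds) pc titles fs fe = "" := by
          simp [pvLoopB, h, h1]
        rw [hstep]
        simp [pvIsIdx, h, h1]
      · by_cases h2 : s = "uploaded" ∨ s = "processing"
        · have hstep : pvLoopB (d :: ds) pc titles fs fe =
              pvLoopB ds (pc + 1) (if pc + 1 ≤ 2 then titles ++ [pvTitleB d] else titles) fs fe := by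
            rcases h2 with h2 | h2 <;> simp [pvLoopB, h, h2]
          rw [hstep, ih]
          have hIdx : (d :: ds).filter pvIsIdx = ds.filter pvIsIdx := by
            rcases h2 with h2 | h2 <;> simp [pvIsIdx, h, h2]
          have hPend : (d :: ds).filter pvIsPend = d :: ds.filter pvIsPend := by
            rcases h2 with h2 | h2 <;> simp [pvIsPend, h, h2]
          have hFail : (d :: ds).filter pvIsFail = ds.filter pvIsFail := by
            rcases h2 with h2 | h2 <;> simp [pvIsFail, h, h2]
          rw [hIdx, hPend, hFail]
          by_cases hlt : pc + 1 ≤ 2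
          · have harith : 2 - pc = (2 - (pc + 1)) + 1 := by omega
            simp [hlt, harith, List.take_succ_cons, Nat.add_assoc, Nat.add_comm 1]
          · have e1 : 2 - pc = 0 := by omega
            have e2 : 2 - (pc + 1) = 0 := by omega
            simp [hlt, e1, e2, Nat.add_assoc, Nat.add_comm 1]
        · rcases not_or.mp h2 with ⟨h2a, h2b⟩
          have hIdx : (d :: ds).filter pvIsIdx = ds.filter pvIsIdx := by
            simp [pvIsIdx, h, h1]
          have hPend : (d :: ds).filter pvIsPend = ds.filter pvIsPend := by
            simp [pvIsPend, h, h2a, h2b]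
          by_cases h3 : s = "failed"
          · have hFail : (d :: ds).filter pvIsFail = d :: ds.filter pvIsFail := by
              simp [pvIsFail, h, h3]
            by_cases hfs : fs
            · have hstep : pvLoopB (d :: ds) pc titles fs fe = pvLoopB ds pc titles fs fe := by
                simp [pvLoopB, h, h1, h2a, h2b, hfs]
              rw [hstep, ih, hIdx, hPend, hFail]
              simp [hfs]
            · have hstep : pvLoopB (d :: ds) pc titles fs fe =
                  pvLoopB ds pc titles true (pvGetB d "processing_error") := by
                simp [pvLoopB, h, h3, hfs]
              rw [hstep, ih, hIdx, hPend, hFail]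
              simp [hfs]
          · have hFail : (d :: ds).filter pvIsFail = ds.filter pvIsFail := by
              simp [pvIsFail, h, h3]
            have hstep : pvLoopB (d :: ds) pc titles fs fe = pvLoopB ds pc titles fs fe := by
              simp [pvLoopB, h, h1, h2a, h2b, h3]
            rw [hstep, ih, hIdx, hPend, hFail]


-- ===== VERDICT (by name: the statement is the Claim_ definition above) =====
theorem build_readiness_message_py_spec : Claim_equal_build_readiness_message_py := by
  intro documents _
  show build_readiness_message_py documents = build_readiness_message_py_alt documents
  simp only [build_readiness_message_py, build_readiness_message_py_alt]
  by_cases hnil : documents = []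
  · rw [if_pos hnil, if_pos hnil]
  · have e1 : documents.filter (fun doc => pvGetA doc "processing_status" == some "indexed")
        = documents.filter pvIsIdx := rfl
    have e2 : documents.filter (fun doc =>
        pvGetA doc "processing_status" == some "uploaded" ||
        pvGetA doc "processing_status" == some "processing") = documents.filter pvIsPend := rfl
    have e3 : documents.filter (fun doc => pvGetA doc "processing_status" == some "failed")
        = documents.filter pvIsFail := rfl
    have et : pvTitleA = pvTitleB := rfl
    have eg : pvGetA = pvGetB := rfl
    rw [if_neg hnil, if_neg hnil, pvLoopB_char, e1, e2, e3, et, eg]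
    by_cases hidx : documents.filter pvIsIdx = []
    · have hidx' : ¬(documents.filter pvIsIdx ≠ []) := by simpa using hidx
      rw [if_neg hidx', if_neg hidx']
      by_cases hp : documents.filter pvIsPend = []
      · have hp' : ¬(documents.filter pvIsPend ≠ []) := by simpa using hp
        rw [if_neg hp', hp]
        rcases hf : documents.filter pvIsFail with _ | ⟨f, fl⟩
        · simp [pvFinalB]
        · simp [pvFinalB]
      · rw [if_pos hp]
        have hlen : (documents.filter pvIsPend).length ≠ 0 := by
          simpa [List.length_eq_zero_iff] using hp
        simp [pvFinalB, hlen]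
    · have hidx' : documents.filter pvIsIdx ≠ [] := hidx
      rw [if_pos hidx', if_pos hidx']
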